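-- pv_equiv track=rewrite | github.com/x-Kevin-Paul-x/Footy | league.py | _get_position_group
-- ===== SOURCE A (Python) =====
-- def _get_position_group(postions):
--     for postion in postions:
--         if postion == "GK":
--             return "GK"
--         elif postion in ["CB", "LB", "RB", "LWB", "RWB", "SW"]:
--             return "DEF"
--         elif postion in ["CM", "CDM", "CAM", "LM", "RM", "DM"]:
--             return "MID"
--         else:
--             return "FWD"
-- ===== SOURCE B (Python) =====
-- _GROUP_TABLE = (
--     ("GK", ("GK",)),
--     ("DEF", ("CB", "LB", "RB", "LWB", "RWB", "SW")),
--     ("MID", ("CM", "CDM", "CAM", "LM", "RM", "DM")),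
-- )
--
-- def _classify(postion):
--     for group, members in _GROUP_TABLE:
--         if postion in members:
--             return group
--     return "FWD"
--
-- def _get_position_group(postions):
--     groups = [_classify(p) for p in postions]
--     return groups[0] if groups else None
-- ===== Notes on version B (the rewrite author's own statement) =====
-- stated objective: alternative
-- what changed: Instead of early-returning from an if/elif chain on the first element, B maps every element through a data-driven classifier that scans a (group, members) table, then takes the head of the resulting list (None when empty).
import Mathlib
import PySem

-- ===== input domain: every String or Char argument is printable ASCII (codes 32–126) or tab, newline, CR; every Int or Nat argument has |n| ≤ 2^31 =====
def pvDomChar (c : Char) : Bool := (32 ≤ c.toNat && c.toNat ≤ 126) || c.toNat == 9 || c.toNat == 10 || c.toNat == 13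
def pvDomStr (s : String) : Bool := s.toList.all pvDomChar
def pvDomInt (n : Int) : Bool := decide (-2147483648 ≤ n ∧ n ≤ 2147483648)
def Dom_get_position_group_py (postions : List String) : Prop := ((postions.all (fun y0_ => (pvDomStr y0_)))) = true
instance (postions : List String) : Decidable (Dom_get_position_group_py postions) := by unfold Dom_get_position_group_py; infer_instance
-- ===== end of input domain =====

-- ===== PORT A =====
-- B maps all elements through a data-driven (group, members)-table classifier and takes the head (alternative decomposition).
def get_position_group_py (postions : List String) : Option String :=
  match postions with
  | [] => none
  | postion :: _ =>
    if postion == "GK" then some "GK"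
    else if ["CB", "LB", "RB", "LWB", "RWB", "SW"].contains postion then some "DEF"
    else if ["CM", "CDM", "CAM", "LM", "RM", "DM"].contains postion then some "MID"
    else some "FWD"

-- ===== PORT B =====
def pvGroupTable : List (String × List String) :=
  [("GK", ["GK"]),
   ("DEF", ["CB", "LB", "RB", "LWB", "RWB", "SW"]),
   ("MID", ["CM", "CDM", "CAM", "LM", "RM", "DM"])]

def pvClassifyAux (postion : String) : List (String × List String) → String
  | [] => "FWD"
  | (group, members) :: rest =>
    if members.contains postion then group else pvClassifyAux postion rest

def pvClassify (postion : String) : String := pvClassifyAux postion pvGroupTable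

def get_position_group_py_alt (postions : List String) : Option String :=
  (postions.map pvClassify).head?

-- ===== PRECONDITION & SPEC =====
def Spec_get_position_group_py (postions : List String) (out : Option String) : Prop := out = get_position_group_py_alt postions
instance (postions : List String) (out : Option String) : Decidable (Spec_get_position_group_py postions out) := by unfold Spec_get_position_group_py; infer_instance

-- ===== CLAIM (what is proved, stated in full; the proofs are below) =====
def Claim_equal_get_position_group_py : Prop := ∀ (postions : List String), Dom_get_position_group_py postions → Spec_get_position_group_py postions (get_position_group_py postions)

-- ===== LEMMAS AND PROOFS =====

lemma classify_head (p : String) (rest : List String) :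
    get_position_group_py_alt (p :: rest) = some (pvClassify p) := by
  simp [get_position_group_py_alt]

-- ===== VERDICT (by name: the statement is the Claim_ definition above) =====
theorem get_position_group_py_spec : Claim_equal_get_position_group_py := by
  intro postions _
  unfold Spec_get_position_group_py
  cases postions with
  | nil => rfl
  | cons p rest =>
    rw [classify_head]
    by_cases h0 : p = "GK"
    · subst h0; rfl
    by_cases h1 : p = "CB"
    · subst h1; rfl
    by_cases h2 : p = "LB"
    · subst h2; rfl
    by_cases h3 : p = "RB"
    · subst h3; rfl
    by_cases h4 : p = "LWB"
    · subst h4; rfl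
    by_cases h5 : p = "RWB"
    · subst h5; rfl
    by_cases h6 : p = "SW"
    · subst h6; rfl
    by_cases h7 : p = "CM"
    · subst h7; rfl
    by_cases h8 : p = "CDM"
    · subst h8; rfl
    by_cases h9 : p = "CAM"
    · subst h9; rfl
    by_cases h10 : p = "LM"
    · subst h10; rfl
    by_cases h11 : p = "RM"
    · subst h11; rfl
    by_cases h12 : p = "DM"
    · subst h12; rfl
    simp [get_position_group_py, pvClassify, pvGroupTable, pvClassifyAux,
      h0, h1, h2, h3, h4, h5, h6, h7, h8, h9, h10, h11, h12]
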